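-- pv_equiv track=rewrite | github.com/ha4219/algorithm | cf/round_16/2.py | solution
-- ===== SOURCE A (Python) =====
-- def mex(s):
--     fl = 0
--     for c in s:
--         if c=='0':
--             fl |= 1
--         elif c=='1':
--             fl |= 2
--     if fl==3:
--         return 2
--     if fl==1:
--         return 1
--     return 0
--
-- def solution(n, s1, s2):
--     d = [0] * (n+1)
--     for i in range(n):
--         s = ''
--         for j in range(n):
--             if i+j>=n: break
--             s += s1[i+j]
--             s += s2[i+j]
--             d[i+j+1] = max(d[i+j+1], d[i]+mex(s))
--     return d[n]
-- ===== SOURCE B (Python) =====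
-- def solution(n, s1, s2):
--     dp = [0] * (n + 1)
--     last0 = last1 = -1
--     for i in range(n):
--         a, b = s1[i], s2[i]
--         if a == '0' or b == '0':
--             last0 = i
--         if a == '1' or b == '1':
--             last1 = i
--         col = 2 if (last0 == i and last1 == i) else (1 if last0 == i else 0)
--         best = dp[i] + col
--         if last0 >= 0 and last1 >= 0:
--             best = max(best, dp[min(last0, last1)] + 2)
--         dp[i + 1] = best
--     return dp[n]
-- ===== Notes on version B (the rewrite author's own statement) =====
-- stated objective: faster
-- what changed: A relaxes every segment [i,j] rebuilding the segment string and rescanning it for its mex (O(n^3)); B is a one-pass DP that exploits that the optimum over partitions only ever needs a singleton segment or one segment reaching back to min(last column with a '0', last column with a '1'), maintained incrementally.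
import Mathlib
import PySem

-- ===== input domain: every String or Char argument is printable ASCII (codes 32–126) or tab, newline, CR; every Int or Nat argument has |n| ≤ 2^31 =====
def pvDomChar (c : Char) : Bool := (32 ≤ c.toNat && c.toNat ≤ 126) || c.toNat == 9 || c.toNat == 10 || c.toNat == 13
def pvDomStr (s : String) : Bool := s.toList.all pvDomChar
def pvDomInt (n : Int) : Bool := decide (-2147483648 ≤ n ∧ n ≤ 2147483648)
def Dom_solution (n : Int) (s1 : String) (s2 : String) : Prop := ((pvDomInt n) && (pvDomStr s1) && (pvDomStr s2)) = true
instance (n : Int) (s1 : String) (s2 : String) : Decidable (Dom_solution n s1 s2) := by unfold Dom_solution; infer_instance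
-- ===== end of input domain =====

-- B replaces A's O(n^3) all-segments relaxation (rebuild + rescan of the segment string for every
-- start/length pair) by a one-pass DP that only considers the singleton segment and the one segment
-- reaching back to min(last column containing '0', last column containing '1').

-- ===== PORT A =====
-- literal port of helper mex(s); Python's int flag stays Int, '|' is PySem.Int.bor
def pyMex (s : List Char) : Int :=
  let fl := s.foldl (fun fl c =>
    if c = '0' then PySem.Int.bor fl 1
    else if c = '1' then PySem.Int.bor fl 2
    else fl) 0
  if fl = 3 then 2 else if fl = 1 then 1 else 0

def solution (n : Int) (s1 : String) (s2 : String) : Int :=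
  let c1 := s1.toList
  let c2 := s2.toList
  let d0 : List Int := List.replicate (n + 1).toNat 0
  let d := (PySem.List.pyRange 0 n 1).foldl (fun d i =>
      ((PySem.List.pyRange 0 n 1).foldl (fun (sd : List Char × List Int) j =>
          if n ≤ i + j then sd
          else
            let s := sd.1 ++ [PySem.List.pyGetD c1 (i + j) ' ', PySem.List.pyGetD c2 (i + j) ' ']
            ⟨s, PySem.List.pySetD sd.2 (i + j + 1)
                  (max (PySem.List.pyGetD sd.2 (i + j + 1) 0)
                       (PySem.List.pyGetD sd.2 i 0 + pyMex s))⟩)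
        (([] : List Char), d)).2)
    d0
  PySem.List.pyGetD d n 0

-- ===== PORT B =====
-- literal port of Source B: state (dp, last0, last1), one pass over the columns
def solution_alt (n : Int) (s1 : String) (s2 : String) : Int :=
  let c1 := s1.toList
  let c2 := s2.toList
  let st := (PySem.List.pyRange 0 n 1).foldl (fun (st : List Int × Int × Int) i =>
      let dp := st.1
      let a := PySem.List.pyGetD c1 i ' '
      let b := PySem.List.pyGetD c2 i ' '
      let last0 := if a = '0' ∨ b = '0' then i else st.2.1
      let last1 := if a = '1' ∨ b = '1' then i else st.2.2
      let col : Int := if last0 = i ∧ last1 = i then 2 else if last0 = i then 1 else 0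
      let best := PySem.List.pyGetD dp i 0 + col
      let best := if 0 ≤ last0 ∧ 0 ≤ last1 then
          max best (PySem.List.pyGetD dp (min last0 last1) 0 + 2)
        else best
      ⟨PySem.List.pySetD dp (i + 1) best, last0, last1⟩)
    (List.replicate (n + 1).toNat 0, -1, -1)
  PySem.List.pyGetD st.1 n 0



-- ===== PRECONDITION & SPEC =====
-- Pre_ excludes exactly the inputs where Python A raises: n < 0 (d[n] is an IndexError) or
-- n exceeding a string length (s1[i]/s2[i] IndexError).
def Pre_solution (n : Int) (s1 : String) (s2 : String) : Prop :=
  0 ≤ n ∧ n ≤ (s1.toList.length : Int) ∧ n ≤ (s2.toList.length : Int)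
instance (n : Int) (s1 : String) (s2 : String) : Decidable (Pre_solution n s1 s2) := by
  unfold Pre_solution; infer_instance

def pvWitness_solution : Int × String × String := (2, "01", "10")

def Spec_solution (n : Int) (s1 : String) (s2 : String) (out : Int) : Prop := out = solution_alt n s1 s2
instance (n : Int) (s1 : String) (s2 : String) (out : Int) : Decidable (Spec_solution n s1 s2 out) := by
  unfold Spec_solution; infer_instance

-- ===== CLAIM (what is proved, stated in full; the proofs are below) =====
def Claim_equal_solution : Prop := ∀ (n : Int) (s1 : String) (s2 : String),
  Dom_solution n s1 s2 → Pre_solution n s1 s2 → Spec_solution n s1 s2 (solution n s1 s2)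

-- ===== LEMMAS AND PROOFS =====

theorem flagFold_eq (s : List Char) : ∀ (fl : Int), fl = 0 ∨ fl = 1 ∨ fl = 2 ∨ fl = 3 →
    s.foldl (fun fl c =>
      if c = '0' then PySem.Int.bor fl 1
      else if c = '1' then PySem.Int.bor fl 2
      else fl) fl
    = (if fl = 1 ∨ fl = 3 ∨ s.any (· == '0') then 1 else 0)
      + (if fl = 2 ∨ fl = 3 ∨ s.any (· == '1') then 2 else 0) := by
  induction s with
  | nil => rintro fl (rfl | rfl | rfl | rfl) <;> simp
  | cons c s ih =>
    rintro fl hfl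
    by_cases hc0 : c = '0'
    · rcases hfl with rfl | rfl | rfl | rfl <;>
      · simp only [List.foldl_cons, if_pos hc0]
        first
        | rw [show PySem.Int.bor 0 1 = 1 by decide, ih 1 (by tauto)]
        | rw [show PySem.Int.bor 1 1 = 1 by decide, ih 1 (by tauto)]
        | rw [show PySem.Int.bor 2 1 = 3 by decide, ih 3 (by tauto)]
        | rw [show PySem.Int.bor 3 1 = 3 by decide, ih 3 (by tauto)]
        simp [hc0]
    · by_cases hc1 : c = '1'
      · rcases hfl with rfl | rfl | rfl | rfl <;>
        · simp only [List.foldl_cons, if_neg hc0, if_pos hc1]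
          first
          | rw [show PySem.Int.bor 0 2 = 2 by decide, ih 2 (by tauto)]
          | rw [show PySem.Int.bor 1 2 = 3 by decide, ih 3 (by tauto)]
          | rw [show PySem.Int.bor 2 2 = 2 by decide, ih 2 (by tauto)]
          | rw [show PySem.Int.bor 3 2 = 3 by decide, ih 3 (by tauto)]
          simp [hc1]
      · simp only [List.foldl_cons, if_neg hc0, if_neg hc1]
        rw [ih fl hfl]
        simp [hc0, hc1]

theorem pyMex_eq (s : List Char) :
    pyMex s = (if s.any (· == '0') && s.any (· == '1') then 2
               else if s.any (· == '0') then 1 else 0) := by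
  unfold pyMex
  rw [flagFold_eq s 0 (by tauto)]
  by_cases h0 : s.any (· == '0') <;> by_cases h1 : s.any (· == '1') <;> simp [h0, h1]

def col0 (c1 c2 : List Char) (p : Nat) : Bool := (c1.getD p ' ' == '0') || (c2.getD p ' ' == '0')
def col1 (c1 c2 : List Char) (p : Nat) : Bool := (c1.getD p ' ' == '1') || (c2.getD p ' ' == '1')
def seg0 (c1 c2 : List Char) (i k : Nat) : Bool := (List.range (k - i)).any fun t => col0 c1 c2 (i + t)
def seg1 (c1 c2 : List Char) (i k : Nat) : Bool := (List.range (k - i)).any fun t => col1 c1 c2 (i + t)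
def mexSeg (c1 c2 : List Char) (i k : Nat) : Int :=
  if seg0 c1 c2 i k && seg1 c1 c2 i k then 2 else if seg0 c1 c2 i k then 1 else 0

def fvec (c1 c2 : List Char) : Nat → List Int
  | 0 => [0]
  | k+1 =>
    let L := fvec c1 c2 k
    L ++ [(List.range (k+1)).foldl (fun acc i => max acc (L.getD i 0 + mexSeg c1 c2 i (k+1))) 0]

def fopt (c1 c2 : List Char) (k : Nat) : Int := (fvec c1 c2 k).getD k 0

theorem seg0_iff (c1 c2 : List Char) (i k : Nat) :
    seg0 c1 c2 i k = true ↔ ∃ p, i ≤ p ∧ p < k ∧ col0 c1 c2 p = true := by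
  simp only [seg0, List.any_eq_true, List.mem_range]
  constructor
  · rintro ⟨t, ht, h⟩; exact ⟨i + t, by omega, by omega, h⟩
  · rintro ⟨p, h1, h2, h⟩; exact ⟨p - i, by omega, by simpa [Nat.add_sub_cancel' h1] using h⟩

theorem seg1_iff (c1 c2 : List Char) (i k : Nat) :
    seg1 c1 c2 i k = true ↔ ∃ p, i ≤ p ∧ p < k ∧ col1 c1 c2 p = true := by
  simp only [seg1, List.any_eq_true, List.mem_range]
  constructor
  · rintro ⟨t, ht, h⟩; exact ⟨i + t, by omega, by omega, h⟩
  · rintro ⟨p, h1, h2, h⟩; exact ⟨p - i, by omega, by simpa [Nat.add_sub_cancel' h1] using h⟩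

theorem mexSeg_nonneg (c1 c2 : List Char) (i k : Nat) : 0 ≤ mexSeg c1 c2 i k := by
  unfold mexSeg; split_ifs <;> norm_num

theorem mexSeg_col (c1 c2 : List Char) (k : Nat) :
    mexSeg c1 c2 k (k+1) =
      (if col0 c1 c2 k && col1 c1 c2 k then 2 else if col0 c1 c2 k then 1 else 0) := by
  have h0 : seg0 c1 c2 k (k+1) = col0 c1 c2 k := by
    simp [seg0, List.range_succ]
  have h1 : seg1 c1 c2 k (k+1) = col1 c1 c2 k := by
    simp [seg1, List.range_succ]
  simp [mexSeg, h0, h1]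

theorem length_fvec (c1 c2 : List Char) (k : Nat) : (fvec c1 c2 k).length = k + 1 := by
  induction k with
  | zero => rfl
  | succ k ih => simp [fvec, ih]

theorem fvec_succ (c1 c2 : List Char) (k : Nat) :
    fvec c1 c2 (k+1) = fvec c1 c2 k ++
      [(List.range (k+1)).foldl
        (fun acc i => max acc ((fvec c1 c2 k).getD i 0 + mexSeg c1 c2 i (k+1))) 0] := rfl

theorem fvec_getD (c1 c2 : List Char) {i k : Nat} (h : i ≤ k) :
    (fvec c1 c2 k).getD i 0 = fopt c1 c2 i := by
  induction k with
  | zero => interval_cases i; rfl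
  | succ k ih =>
    rcases Nat.lt_or_ge i (k+1) with hlt | hge
    · rw [fvec_succ]
      rw [List.getD_append _ _ _ _ (by rw [length_fvec]; omega)]
      exact ih (by omega)
    · have : i = k + 1 := by omega
      subst this; rfl

theorem fopt_succ (c1 c2 : List Char) (k : Nat) :
    fopt c1 c2 (k+1)
      = (List.range (k+1)).foldl (fun acc i => max acc (fopt c1 c2 i + mexSeg c1 c2 i (k+1))) 0 := by
  have hL : fopt c1 c2 (k+1)
      = (List.range (k+1)).foldl (fun acc i => max acc ((fvec c1 c2 k).getD i 0 + mexSeg c1 c2 i (k+1))) 0 := by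
    rw [fopt, fvec_succ]
    rw [List.getD_append_right _ _ _ _ (by simp [length_fvec])]
    simp [length_fvec]
  rw [hL]
  apply PySem.List.foldl_congr_mem
  intro acc i hi
  rw [fvec_getD c1 c2 (Nat.lt_succ_iff.mp (List.mem_range.mp hi))]

theorem foldl_max_le {α : Type} (l : List α) (f : α → Int) (init B : Int)
    (h0 : init ≤ B) (h : ∀ x ∈ l, f x ≤ B) :
    l.foldl (fun acc x => max acc (f x)) init ≤ B := by
  induction l generalizing init with
  | nil => exact h0
  | cons x l ih =>
    exact ih _ (max_le h0 (h x (by simp))) (fun y hy => h y (List.mem_cons_of_mem _ hy))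

theorem fopt_nonneg (c1 c2 : List Char) (k : Nat) : 0 ≤ fopt c1 c2 k := by
  cases k with
  | zero => norm_num [fopt, fvec]
  | succ k =>
    rw [fopt_succ]
    exact (PySem.List.le_foldl_max_int _ _ _).1

theorem cand_le_fopt (c1 c2 : List Char) {i k : Nat} (h : i ≤ k) :
    fopt c1 c2 i + mexSeg c1 c2 i (k+1) ≤ fopt c1 c2 (k+1) := by
  rw [fopt_succ]
  exact (PySem.List.le_foldl_max_int (List.range (k+1)) _ 0).2 i (by simp; omega)

theorem fopt_mono (c1 c2 : List Char) {a b : Nat} (h : a ≤ b) :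
    fopt c1 c2 a ≤ fopt c1 c2 b := by
  induction b with
  | zero => interval_cases a; rfl
  | succ b ih =>
    rcases Nat.lt_or_ge a (b+1) with hlt | hge
    · calc fopt c1 c2 a ≤ fopt c1 c2 b := ih (by omega)
        _ ≤ fopt c1 c2 b + mexSeg c1 c2 b (b+1) := by have := mexSeg_nonneg c1 c2 b (b+1); omega
        _ ≤ fopt c1 c2 (b+1) := cand_le_fopt c1 c2 (le_refl b)
    · have : a = b + 1 := by omega
      subst this; rfl

def lzero (c1 c2 : List Char) : Nat → Int
  | 0 => -1
  | i+1 => if col0 c1 c2 i then (i : Int) else lzero c1 c2 i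

def lone (c1 c2 : List Char) : Nat → Int
  | 0 => -1
  | i+1 => if col1 c1 c2 i then (i : Int) else lone c1 c2 i

theorem lzero_lt (c1 c2 : List Char) (i : Nat) : lzero c1 c2 i < i := by
  induction i with
  | zero => norm_num [lzero]
  | succ i ih => rw [lzero]; split_ifs <;> push_cast <;> omega

theorem lone_lt (c1 c2 : List Char) (i : Nat) : lone c1 c2 i < i := by
  induction i with
  | zero => norm_num [lone]
  | succ i ih => rw [lone]; split_ifs <;> push_cast <;> omega

theorem lzero_col (c1 c2 : List Char) (i : Nat) (h : 0 ≤ lzero c1 c2 i) :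
    col0 c1 c2 (lzero c1 c2 i).toNat = true := by
  induction i with
  | zero => norm_num [lzero] at h
  | succ i ih =>
    rw [lzero] at h ⊢
    split_ifs at h ⊢ with hc
    · simpa using hc
    · exact ih h

theorem lone_col (c1 c2 : List Char) (i : Nat) (h : 0 ≤ lone c1 c2 i) :
    col1 c1 c2 (lone c1 c2 i).toNat = true := by
  induction i with
  | zero => norm_num [lone] at h
  | succ i ih =>
    rw [lone] at h ⊢
    split_ifs at h ⊢ with hc
    · simpa using hc
    · exact ih h

theorem le_lzero (c1 c2 : List Char) {p i : Nat} (hp : p < i) (hc : col0 c1 c2 p = true) :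
    (p : Int) ≤ lzero c1 c2 i := by
  induction i with
  | zero => omega
  | succ i ih =>
    rw [lzero]
    rcases Nat.lt_or_ge p i with h | h
    · split_ifs with hcc
      · omega
      · exact ih h
    · have : p = i := by omega
      subst this
      simp [hc]

theorem le_lone (c1 c2 : List Char) {p i : Nat} (hp : p < i) (hc : col1 c1 c2 p = true) :
    (p : Int) ≤ lone c1 c2 i := by
  induction i with
  | zero => omega
  | succ i ih =>
    rw [lone]
    rcases Nat.lt_or_ge p i with h | h
    · split_ifs with hcc
      · omega
      · exact ih h
    · have : p = i := by omega
      subst this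
      simp [hc]

-- the dominance theorem: the full relaxation over all segment starts equals B's two candidates
theorem step_eq (c1 c2 : List Char) (k : Nat) :
    fopt c1 c2 (k+1) =
      (if 0 ≤ lzero c1 c2 (k+1) ∧ 0 ≤ lone c1 c2 (k+1) then
        max (fopt c1 c2 k + mexSeg c1 c2 k (k+1))
            (fopt c1 c2 (min (lzero c1 c2 (k+1)) (lone c1 c2 (k+1))).toNat + 2)
      else fopt c1 c2 k + mexSeg c1 c2 k (k+1)) := by
  set l0 := lzero c1 c2 (k+1) with hl0
  set l1 := lone c1 c2 (k+1) with hl1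
  have hcand1 : fopt c1 c2 k + mexSeg c1 c2 k (k+1) ≤ fopt c1 c2 (k+1) :=
    cand_le_fopt c1 c2 (le_refl k)
  apply le_antisymm
  · -- upper bound: every candidate is below the RHS
    rw [fopt_succ]
    have hrhs1 : fopt c1 c2 k + mexSeg c1 c2 k (k+1) ≤ _ := le_refl _
    apply foldl_max_le
    · split_ifs
      · have := fopt_nonneg c1 c2 k
        have := mexSeg_nonneg c1 c2 k (k+1)
        have h2 := fopt_nonneg c1 c2 (min l0 l1).toNat
        apply le_max_iff.mpr; right; omega
      · have := fopt_nonneg c1 c2 k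
        have := mexSeg_nonneg c1 c2 k (k+1)
        omega
    · intro i hi
      have hik : i ≤ k := Nat.lt_succ_iff.mp (List.mem_range.mp hi)
      have hmono : fopt c1 c2 i ≤ fopt c1 c2 k := fopt_mono c1 c2 hik
      -- case on the mex of segment [i, k+1)
      by_cases h0 : seg0 c1 c2 i (k+1) = true
      · by_cases h1 : seg1 c1 c2 i (k+1) = true
        · -- mex = 2: reach-back candidate dominates
          have hm : mexSeg c1 c2 i (k+1) = 2 := by simp [mexSeg, h0, h1]
          obtain ⟨p, hip, hpk, hpc⟩ := (seg0_iff c1 c2 i (k+1)).mp h0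
          obtain ⟨q, hiq, hqk, hqc⟩ := (seg1_iff c1 c2 i (k+1)).mp h1
          have hp0 : (p : Int) ≤ l0 := le_lzero c1 c2 hpk hpc
          have hq1 : (q : Int) ≤ l1 := le_lone c1 c2 hqk hqc
          have hcond : 0 ≤ l0 ∧ 0 ≤ l1 := ⟨by omega, by omega⟩
          rw [if_pos hcond]
          have himin : i ≤ (min l0 l1).toNat := by omega
          have : fopt c1 c2 i ≤ fopt c1 c2 (min l0 l1).toNat := fopt_mono c1 c2 himin
          apply le_max_iff.mpr; right; omega
        · -- mex = 1: a singleton '0'-column dominates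
          have hm : mexSeg c1 c2 i (k+1) = 1 := by simp [mexSeg, h0, h1]
          obtain ⟨p, hip, hpk, hpc⟩ := (seg0_iff c1 c2 i (k+1)).mp h0
          have hpc1 : col1 c1 c2 p = false := by
            by_contra hab
            exact h1 ((seg1_iff c1 c2 i (k+1)).mpr ⟨p, hip, hpk, by simpa using hab⟩)
          have hcolmex : mexSeg c1 c2 p (p+1) = 1 := by
            rw [mexSeg_col]; simp [hpc, hpc1]
          have hkey : fopt c1 c2 i + 1 ≤ fopt c1 c2 k + mexSeg c1 c2 k (k+1) := by
            rcases Nat.lt_or_ge p k with hpk' | hpk'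
            · have h1' : fopt c1 c2 i + 1 ≤ fopt c1 c2 p + 1 := by
                have := fopt_mono c1 c2 hip; omega
              have h2' : fopt c1 c2 p + 1 ≤ fopt c1 c2 (p+1) := by
                have := cand_le_fopt c1 c2 (le_refl p); omega
              have h3' : fopt c1 c2 (p+1) ≤ fopt c1 c2 k := fopt_mono c1 c2 (by omega)
              have h4' := mexSeg_nonneg c1 c2 k (k+1)
              omega
            · have hpk2 : p = k := by omega
              subst hpk2
              have := fopt_mono c1 c2 hip
              have : mexSeg c1 c2 p (p+1) = 1 := hcolmex
              omega
          rw [hm]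
          split_ifs
          · exact le_max_iff.mpr (Or.inl hkey)
          · exact hkey
      · -- mex = 0
        have hm : mexSeg c1 c2 i (k+1) = 0 := by simp [mexSeg, h0]
        have h4' := mexSeg_nonneg c1 c2 k (k+1)
        rw [hm]
        split_ifs
        · apply le_max_iff.mpr; left; omega
        · omega
  · -- lower bound: both candidates are genuine candidates
    split_ifs with hcond
    · apply max_le hcand1
      -- the reach-back segment has mex 2
      set mn := (min l0 l1).toNat with hmn
      have hl0n : (l0.toNat : Int) = l0 := Int.toNat_of_nonneg hcond.1
      have hl1n : (l1.toNat : Int) = l1 := Int.toNat_of_nonneg hcond.2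
      have h0lt : l0 < (k+1 : Int) := by exact_mod_cast lzero_lt c1 c2 (k+1)
      have h1lt : l1 < (k+1 : Int) := by exact_mod_cast lone_lt c1 c2 (k+1)
      have hseg2 : mexSeg c1 c2 mn (k+1) = 2 := by
        have hs0 : seg0 c1 c2 mn (k+1) = true := by
          apply (seg0_iff c1 c2 mn (k+1)).mpr
          exact ⟨l0.toNat, by omega, by omega, lzero_col c1 c2 (k+1) hcond.1⟩
        have hs1 : seg1 c1 c2 mn (k+1) = true := by
          apply (seg1_iff c1 c2 mn (k+1)).mpr
          exact ⟨l1.toNat, by omega, by omega, lone_col c1 c2 (k+1) hcond.2⟩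
        simp [mexSeg, hs0, hs1]
      have := cand_le_fopt c1 c2 (show mn ≤ k by omega)
      omega
    · exact hcand1

def interleave (c1 c2 : List Char) (i u : Nat) : List Char :=
  (List.range u).flatMap (fun t => [c1.getD (i+t) ' ', c2.getD (i+t) ' '])

theorem interleave_succ (c1 c2 : List Char) (i u : Nat) :
    interleave c1 c2 i (u+1) = interleave c1 c2 i u ++ [c1.getD (i+u) ' ', c2.getD (i+u) ' '] := by
  simp [interleave, List.range_succ]

theorem pyMex_interleave (c1 c2 : List Char) (i u : Nat) :
    pyMex (interleave c1 c2 i u) = mexSeg c1 c2 i (i+u) := by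
  rw [pyMex_eq]
  have h0 : (interleave c1 c2 i u).any (· == '0') = seg0 c1 c2 i (i+u) := by
    simp [interleave, List.any_flatMap, seg0, col0]
  have h1 : (interleave c1 c2 i u).any (· == '1') = seg1 c1 c2 i (i+u) := by
    simp [interleave, List.any_flatMap, seg1, col1]
  rw [h0, h1, mexSeg]

def Ppart (c1 c2 : List Char) (t k : Nat) : Int :=
  (List.range (min t k)).foldl (fun acc i => max acc (fopt c1 c2 i + mexSeg c1 c2 i k)) 0

theorem Ppart_eq_fopt (c1 c2 : List Char) {t k : Nat} (h : k ≤ t) :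
    Ppart c1 c2 t k = fopt c1 c2 k := by
  cases k with
  | zero => simp [Ppart, fopt, fvec]
  | succ k =>
    have hm : min t (k+1) = k+1 := by omega
    rw [Ppart, hm, fopt_succ]

theorem Ppart_succ (c1 c2 : List Char) {t k : Nat} (h : t < k) :
    Ppart c1 c2 (t+1) k = max (Ppart c1 c2 t k) (fopt c1 c2 t + mexSeg c1 c2 t k) := by
  have h1 : min (t+1) k = t+1 := by omega
  have h2 : min t k = t := by omega
  rw [Ppart, Ppart, h1, h2, List.range_succ, List.foldl_append]
  simp


theorem getD_set (l : List Int) (i : Nat) (v : Int) (k : Nat) (h : i < l.length) :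
    (l.set i v).getD k 0 = if k = i then v else l.getD k 0 := by
  rcases Nat.lt_or_ge k l.length with hk | hk
  · by_cases hki : k = i
    · subst hki
      simp [List.getD_eq_getElem?_getD, hk]
    · simp [List.getD_eq_getElem?_getD, hk, hki, Ne.symm hki]
  · have h1 : l.getD k 0 = 0 := by
      rw [List.getD_eq_getElem?_getD, List.getElem?_eq_none (by omega)]; rfl
    have h2 : (l.set i v).getD k 0 = 0 := by
      rw [List.getD_eq_getElem?_getD, List.getElem?_eq_none (by simpa using by omega)]; rfl
    rw [h1, h2, if_neg (by omega)]

-- A's inner loop body (the literal lambda of the port)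
def stepA (c1 c2 : List Char) (n i : Int) (sd : List Char × List Int) (j : Int) :
    List Char × List Int :=
  if n ≤ i + j then sd
  else
    let s := sd.1 ++ [PySem.List.pyGetD c1 (i + j) ' ', PySem.List.pyGetD c2 (i + j) ' ']
    ⟨s, PySem.List.pySetD sd.2 (i + j + 1)
          (max (PySem.List.pyGetD sd.2 (i + j + 1) 0)
               (PySem.List.pyGetD sd.2 i 0 + pyMex s))⟩

def outerA (c1 c2 : List Char) (n : Int) (d : List Int) (i : Int) : List Int :=
  ((PySem.List.pyRange 0 n 1).foldl (stepA c1 c2 n i) (([] : List Char), d)).2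

theorem innerA_inv (c1 c2 : List Char) (m i : Nat) (d : List Int)
    (hlen : d.length = m+1) (hd : ∀ k, k ≤ m → d.getD k 0 = Ppart c1 c2 i k) :
    ∀ r, r ≤ m →
      ∃ d', (PySem.List.pyRange 0 (r : Int) 1).foldl (stepA c1 c2 (m : Int) (i : Int)) (([] : List Char), d)
              = (interleave c1 c2 i (min r (m-i)), d')
        ∧ d'.length = m+1
        ∧ ∀ k, k ≤ m → d'.getD k 0 =
            (if i < k ∧ k ≤ i + min r (m-i) then Ppart c1 c2 (i+1) k else Ppart c1 c2 i k) := by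
  intro r
  induction r with
  | zero =>
    intro _
    refine ⟨d, ?_, hlen, ?_⟩
    · rw [PySem.List.pyRange_one_eq_nil (by norm_num)]
      simp [interleave]
    · intro k hk
      rw [if_neg (by omega)]
      exact hd k hk
  | succ r ih =>
    intro hr
    obtain ⟨d', hfold, hlen', hd'⟩ := ih (by omega)
    have hcast : ((r+1 : Nat) : Int) = (r : Int) + 1 := by push_cast; ring
    rw [hcast, PySem.List.pyRange_one_succ_right (by positivity), List.foldl_append]
    rw [hfold]
    simp only [List.foldl_cons, List.foldl_nil]
    by_cases hguard : (m : Int) ≤ (i : Int) + (r : Int)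
    · -- past the break point: state unchanged
      have hmin : min (r+1) (m-i) = min r (m-i) := by omega
      rw [stepA, if_pos hguard, hmin]
      exact ⟨d', rfl, hlen', fun k hk => hd' k hk⟩
    · have hirm : i + r < m := by exact_mod_cast by omega
      have hminr : min r (m-i) = r := by omega
      have hminr1 : min (r+1) (m-i) = r+1 := by omega
      rw [stepA, if_neg hguard]
      simp only []
      set k0 := i + r + 1 with hk0
      have hik : (i : Int) + (r : Int) = ((i+r : Nat) : Int) := by push_cast; ring
      have hik1 : (i : Int) + (r : Int) + 1 = ((k0 : Nat) : Int) := by rw [hk0]; push_cast; ring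
      have hs' : interleave c1 c2 i (min r (m-i)) ++
            [PySem.List.pyGetD c1 ((i : Int) + (r : Int)) ' ', PySem.List.pyGetD c2 ((i : Int) + (r : Int)) ' ']
          = interleave c1 c2 i (r+1) := by
        rw [hminr, hik]
        simp only [PySem.List.pyGetD_natCast]
        exact (interleave_succ c1 c2 i r).symm
      have hgd0 : PySem.List.pyGetD d' ((i : Int) + (r : Int) + 1) 0 = Ppart c1 c2 i k0 := by
        rw [hik1, PySem.List.pyGetD_natCast]
        rw [hd' k0 (by omega), if_neg (by omega)]
      have hgdi : PySem.List.pyGetD d' (i : Int) 0 = fopt c1 c2 i := by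
        rw [PySem.List.pyGetD_natCast, hd' i (by omega), if_neg (by omega),
          Ppart_eq_fopt c1 c2 (le_refl i)]
      have hmex : pyMex (interleave c1 c2 i (min r (m-i)) ++
            [PySem.List.pyGetD c1 ((i : Int) + (r : Int)) ' ', PySem.List.pyGetD c2 ((i : Int) + (r : Int)) ' '])
          = mexSeg c1 c2 i k0 := by
        rw [hs']
        have : i + (r + 1) = k0 := by omega
        rw [← this, pyMex_interleave]
      refine ⟨PySem.List.pySetD d' ((i : Int) + (r : Int) + 1)
          (max (PySem.List.pyGetD d' ((i : Int) + (r : Int) + 1) 0)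
               (PySem.List.pyGetD d' (i : Int) 0 + pyMex (interleave c1 c2 i (min r (m-i)) ++
                 [PySem.List.pyGetD c1 ((i : Int) + (r : Int)) ' ', PySem.List.pyGetD c2 ((i : Int) + (r : Int)) ' ']))),
          ?_, ?_, ?_⟩
      · rw [hminr1, ← hs']
      · rw [PySem.List.length_pySetD, hlen']
      · intro k hk
        rw [hgd0, hgdi, hmex]
        have hvals : max (Ppart c1 c2 i k0) (fopt c1 c2 i + mexSeg c1 c2 i k0) = Ppart c1 c2 (i+1) k0 :=
          (Ppart_succ c1 c2 (by omega)).symm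
        rw [hvals]
        rw [hik1, PySem.List.pySetD_natCast, getD_set d' k0 _ k (by omega)]
        by_cases hkk : k = k0
        · subst hkk
          rw [if_pos rfl, if_pos (by omega)]
        · rw [if_neg hkk, hd' k hk, hminr, hminr1]
          by_cases hcnd : i < k ∧ k ≤ i + r
          · rw [if_pos hcnd, if_pos (by omega)]
          · rw [if_neg hcnd, if_neg (by omega)]

theorem outerA_inv (c1 c2 : List Char) (m : Nat) :
    ∀ t, t ≤ m →
      ∃ d', (PySem.List.pyRange 0 (t : Int) 1).foldl (outerA c1 c2 (m : Int))
              (List.replicate (m+1) (0 : Int)) = d'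
        ∧ d'.length = m+1
        ∧ ∀ k, k ≤ m → d'.getD k 0 = Ppart c1 c2 t k := by
  intro t
  induction t with
  | zero =>
    intro _
    rw [PySem.List.pyRange_one_eq_nil (by norm_num), List.foldl_nil]
    refine ⟨List.replicate (m+1) 0, rfl, by simp, ?_⟩
    intro k hk
    have hP : Ppart c1 c2 0 k = 0 := by simp [Ppart]
    rw [hP, List.getD_eq_getElem?_getD, List.getElem?_replicate, if_pos (by omega)]
    rfl
  | succ t ih =>
    intro ht
    obtain ⟨d', hfold, hlen', hd'⟩ := ih (by omega)
    have hcast : ((t+1 : Nat) : Int) = (t : Int) + 1 := by push_cast; ring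
    rw [hcast, PySem.List.pyRange_one_succ_right (by positivity), List.foldl_append, hfold]
    simp only [List.foldl_cons, List.foldl_nil]
    obtain ⟨d'', hfold2, hlen'', hd''⟩ :=
      innerA_inv c1 c2 m t d' hlen' hd' m (le_refl m)
    refine ⟨_, rfl, ?_, ?_⟩
    · rw [outerA, hfold2]; exact hlen''
    · intro k hk
      rw [outerA, hfold2]
      simp only []
      rw [hd'' k hk]
      have hmm : min m (m - t) = m - t := by omega
      by_cases hc : t < k
      · rw [if_pos (by omega)]
      · rw [if_neg (by omega), Ppart_eq_fopt c1 c2 (by omega),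
          Ppart_eq_fopt c1 c2 (by omega)]

theorem solution_def (n : Int) (s1 s2 : String) :
    solution n s1 s2 = PySem.List.pyGetD
      ((PySem.List.pyRange 0 n 1).foldl (outerA s1.toList s2.toList n)
        (List.replicate (n+1).toNat (0 : Int))) n 0 := rfl

theorem A_eq_fopt (s1 s2 : String) (m : Nat) :
    solution (m : Int) s1 s2 = fopt s1.toList s2.toList m := by
  rw [solution_def]
  have hmt : ((m : Int) + 1).toNat = m + 1 := by omega
  rw [hmt]
  obtain ⟨d', hfold, hlen', hd'⟩ := outerA_inv s1.toList s2.toList m m (le_refl m)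
  rw [hfold]
  have : ((m : Nat) : Int) = ((m : Nat) : Int) := rfl
  rw [PySem.List.pyGetD_natCast, hd' m (le_refl m), Ppart_eq_fopt _ _ (le_refl m)]

-- B's loop body (the literal lambda of the port)
def stepB (c1 c2 : List Char) (st : List Int × Int × Int) (i : Int) : List Int × Int × Int :=
  let dp := st.1
  let a := PySem.List.pyGetD c1 i ' '
  let b := PySem.List.pyGetD c2 i ' '
  let last0 := if a = '0' ∨ b = '0' then i else st.2.1
  let last1 := if a = '1' ∨ b = '1' then i else st.2.2
  let col : Int := if last0 = i ∧ last1 = i then 2 else if last0 = i then 1 else 0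
  let best := PySem.List.pyGetD dp i 0 + col
  let best := if 0 ≤ last0 ∧ 0 ≤ last1 then
      max best (PySem.List.pyGetD dp (min last0 last1) 0 + 2)
    else best
  ⟨PySem.List.pySetD dp (i + 1) best, last0, last1⟩

theorem solution_alt_def (n : Int) (s1 s2 : String) :
    solution_alt n s1 s2 = PySem.List.pyGetD
      ((PySem.List.pyRange 0 n 1).foldl (stepB s1.toList s2.toList)
        (List.replicate (n+1).toNat (0:Int), -1, -1)).1 n 0 := rfl

theorem B_inv (c1 c2 : List Char) (m : Nat) :
    ∀ t, t ≤ m →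
      ∃ dp, (PySem.List.pyRange 0 (t:Int) 1).foldl (stepB c1 c2)
              (List.replicate (m+1) (0:Int), -1, -1)
              = (dp, lzero c1 c2 t, lone c1 c2 t)
        ∧ dp.length = m+1
        ∧ ∀ k, k ≤ m → dp.getD k 0 = if k ≤ t then fopt c1 c2 k else 0 := by
  intro t
  induction t with
  | zero =>
    intro _
    rw [PySem.List.pyRange_one_eq_nil (by norm_num), List.foldl_nil]
    refine ⟨List.replicate (m+1) 0, rfl, by simp, ?_⟩
    intro k hk
    have hz : (List.replicate (m+1) (0:Int)).getD k 0 = 0 := by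
      rw [List.getD_eq_getElem?_getD, List.getElem?_replicate, if_pos (by omega)]; rfl
    rw [hz]
    split_ifs with h
    · have : k = 0 := by omega
      subst this; rfl
    · rfl
  | succ t ih =>
    intro ht
    obtain ⟨dp, hfold, hlen, hd⟩ := ih (by omega)
    have hcast : ((t+1 : Nat) : Int) = (t : Int) + 1 := by push_cast; ring
    rw [hcast, PySem.List.pyRange_one_succ_right (by positivity), List.foldl_append, hfold]
    simp only [List.foldl_cons, List.foldl_nil]
    rw [stepB]
    simp only [PySem.List.pyGetD_natCast]
    have hiff0 : (c1.getD t ' ' = '0' ∨ c2.getD t ' ' = '0') ↔ col0 c1 c2 t = true := by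
      simp [col0]
    have hiff1 : (c1.getD t ' ' = '1' ∨ c2.getD t ' ' = '1') ↔ col1 c1 c2 t = true := by
      simp [col1]
    have hL0 : (if c1.getD t ' ' = '0' ∨ c2.getD t ' ' = '0' then ((t:Nat):Int) else lzero c1 c2 t)
        = lzero c1 c2 (t+1) := by
      rw [lzero]
      by_cases h : col0 c1 c2 t = true
      · rw [if_pos (hiff0.mpr h), if_pos h]
      · rw [if_neg (fun hh => h (hiff0.mp hh)), if_neg h]
    have hL1 : (if c1.getD t ' ' = '1' ∨ c2.getD t ' ' = '1' then ((t:Nat):Int) else lone c1 c2 t)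
        = lone c1 c2 (t+1) := by
      rw [lone]
      by_cases h : col1 c1 c2 t = true
      · rw [if_pos (hiff1.mpr h), if_pos h]
      · rw [if_neg (fun hh => h (hiff1.mp hh)), if_neg h]
    rw [hL0, hL1]
    have h0eq : (lzero c1 c2 (t+1) = (t:Int)) ↔ col0 c1 c2 t = true := by
      rw [lzero]
      constructor
      · intro h
        by_contra hc
        rw [if_neg hc] at h
        have := lzero_lt c1 c2 t
        omega
      · intro h
        rw [if_pos h]
    have h1eq : (lone c1 c2 (t+1) = (t:Int)) ↔ col1 c1 c2 t = true := by
      rw [lone]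
      constructor
      · intro h
        by_contra hc
        rw [if_neg hc] at h
        have := lone_lt c1 c2 t
        omega
      · intro h
        rw [if_pos h]
    have hcol : (if lzero c1 c2 (t+1) = (t:Int) ∧ lone c1 c2 (t+1) = (t:Int) then (2:Int)
          else if lzero c1 c2 (t+1) = (t:Int) then 1 else 0)
        = mexSeg c1 c2 t (t+1) := by
      rw [mexSeg_col]
      by_cases h0 : col0 c1 c2 t = true <;> by_cases h1 : col1 c1 c2 t = true <;>
        simp [h0eq, h1eq, h0, h1]
    rw [hcol]
    have hdt : dp.getD t 0 = fopt c1 c2 t := by rw [hd t (by omega), if_pos (le_refl t)]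
    rw [hdt]
    have hbest : (if 0 ≤ lzero c1 c2 (t+1) ∧ 0 ≤ lone c1 c2 (t+1) then
          max (fopt c1 c2 t + mexSeg c1 c2 t (t+1))
              (PySem.List.pyGetD dp (min (lzero c1 c2 (t+1)) (lone c1 c2 (t+1))) 0 + 2)
        else fopt c1 c2 t + mexSeg c1 c2 t (t+1)) = fopt c1 c2 (t+1) := by
      rw [step_eq c1 c2 t]
      by_cases hcnd : 0 ≤ lzero c1 c2 (t+1) ∧ 0 ≤ lone c1 c2 (t+1)
      · rw [if_pos hcnd, if_pos hcnd]
        have hmin0 : 0 ≤ min (lzero c1 c2 (t+1)) (lone c1 c2 (t+1)) := le_min hcnd.1 hcnd.2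
        set mn := (min (lzero c1 c2 (t+1)) (lone c1 c2 (t+1))).toNat with hmn
        have hminc : min (lzero c1 c2 (t+1)) (lone c1 c2 (t+1)) = (mn : Int) := by
          rw [hmn]
          exact (Int.toNat_of_nonneg hmin0).symm
        have hle : mn ≤ t := by
          have := lzero_lt c1 c2 (t+1)
          have h2 := min_le_left (lzero c1 c2 (t+1)) (lone c1 c2 (t+1))
          omega
        rw [hminc, PySem.List.pyGetD_natCast, hd mn (by omega), if_pos hle]
      · rw [if_neg hcnd, if_neg hcnd]
    rw [hbest]
    have hc1 : (t:Int) + 1 = ((t+1 : Nat) : Int) := by push_cast; ring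
    rw [hc1, PySem.List.pySetD_natCast]
    refine ⟨_, rfl, by rw [List.length_set, hlen], ?_⟩
    intro k hk
    rw [getD_set dp (t+1) _ k (by omega)]
    by_cases hkk : k = t+1
    · subst hkk
      rw [if_pos rfl, if_pos (le_refl _)]
    · rw [if_neg hkk, hd k hk]
      by_cases hkt : k ≤ t
      · rw [if_pos hkt, if_pos (by omega)]
      · rw [if_neg hkt, if_neg (by omega)]

theorem B_eq_fopt (s1 s2 : String) (m : Nat) :
    solution_alt (m : Int) s1 s2 = fopt s1.toList s2.toList m := by
  rw [solution_alt_def]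
  have hmt : ((m : Int) + 1).toNat = m + 1 := by omega
  rw [hmt]
  obtain ⟨dp, hfold, hlen, hd⟩ := B_inv s1.toList s2.toList m m (le_refl m)
  rw [hfold]
  rw [PySem.List.pyGetD_natCast]
  simp only []
  rw [hd m (le_refl m), if_pos (le_refl m)]

-- ===== VERDICT (by name: the statement is the Claim_ definition above) =====
theorem solution_spec : Claim_equal_solution := by
  unfold Claim_equal_solution
  intro n s1 s2 _ hpre
  unfold Spec_solution
  obtain ⟨hn, -, -⟩ := hpre
  obtain ⟨m, rfl⟩ : ∃ m : Nat, n = (m : Int) := ⟨n.toNat, (Int.toNat_of_nonneg hn).symm⟩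
  rw [A_eq_fopt, B_eq_fopt]
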